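-- pv_equiv track=rewrite | github.com/kuayiraphael/datastructuresandalgorithms | A2SV Ghana G6 - Round #10 04-May-2025/E - Good Subarrays 348145.py | Check
-- ===== SOURCE A (Python) =====
-- def Check(a,n):
--     Dict = {0:1}
--     running_sum = 0
--     count = 0
--
--     for i in range(len(a)):
--         running_sum += a[i]-1
--         count += Dict.get(running_sum,0)
--         Dict[running_sum] = Dict.get(running_sum,0)+1
--
--     return count
-- ===== SOURCE B (Python) =====
-- def Check(a, n):
--     # sort-and-sweep: good subarrays = pairs of equal prefix sums of (a[i]-1)
--     prefs = [0]
--     s = 0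
--     for x in a:
--         s += x - 1
--         prefs.append(s)
--     prefs.sort()
--     ans = 0
--     run = 0
--     prev = None
--     for x in prefs:
--         if prev is not None and x == prev:
--             run += 1
--         else:
--             run = 0
--         ans += run
--         prev = x
--     return ans
-- ===== Notes on version B (the rewrite author's own statement) =====
-- stated objective: alternative
-- what changed: Replaces the online hashmap pair-counting with building the full prefix-sum list, sorting it, and sweeping it once counting runs of equal values (each run of length m contributes 0+1+...+(m-1) pairs).
import Mathlib
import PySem

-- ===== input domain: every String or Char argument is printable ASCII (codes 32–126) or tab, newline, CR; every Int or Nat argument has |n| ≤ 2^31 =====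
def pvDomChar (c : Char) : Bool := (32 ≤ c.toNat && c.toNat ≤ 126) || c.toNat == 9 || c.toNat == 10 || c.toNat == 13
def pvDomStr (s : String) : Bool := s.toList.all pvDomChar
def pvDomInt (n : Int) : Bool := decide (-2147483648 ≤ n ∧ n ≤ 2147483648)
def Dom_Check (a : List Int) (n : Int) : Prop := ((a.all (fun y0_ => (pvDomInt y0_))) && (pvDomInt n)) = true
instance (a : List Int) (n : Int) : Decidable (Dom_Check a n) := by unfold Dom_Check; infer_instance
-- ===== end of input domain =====

-- B replaces A's online hashmap pair-counting by sort-the-prefix-sums and one run-counting sweep (alternative decomposition, not claimed faster).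

-- ===== PORT A =====
def Check (a : List Int) (n : Int) : Int :=
  let d0 : PySem.Dict Int Int := PySem.Dict.ofList [(0, 1)]
  let st := (PySem.List.pyRange 0 (PySem.List.len a) 1).foldl
    (fun (st : Int × Int × PySem.Dict Int Int) i =>
      let rs := st.1 + (PySem.List.pyGetD a i 0 - 1)
      let cnt := st.2.1 + st.2.2.getD rs 0
      (rs, cnt, st.2.2.insert rs (st.2.2.getD rs 0 + 1)))
    (0, 0, d0)
  st.2.1

-- ===== PORT B =====
def Check_alt (a : List Int) (n : Int) : Int :=
  let built := a.foldl (fun (st : List Int × Int) x =>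
    let s := st.2 + (x - 1)
    (st.1 ++ [s], s)) (([0] : List Int), 0)
  let prefs := PySem.List.sorted built.1 (fun v => v) false
  let fin := prefs.foldl (fun (st : Int × Int × Option Int) x =>
    let run := if st.2.2 = some x then st.2.1 + 1 else 0
    (st.1 + run, run, some x)) (0, 0, (none : Option Int))
  fin.1

-- ===== PRECONDITION & SPEC =====
def Spec_Check (a : List Int) (n : Int) (out : Int) : Prop := out = Check_alt a n
instance (a : List Int) (n : Int) (out : Int) : Decidable (Spec_Check a n out) := by unfold Spec_Check; infer_instance

-- ===== CLAIM (what is proved, stated in full; the proofs are below) =====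
def Claim_equal_Check : Prop := ∀ (a : List Int) (n : Int), Dom_Check a n → Spec_Check a n (Check a n)

-- ===== LEMMAS AND PROOFS =====

/-- A's loop body, named so the range-over-indices fold can be rewritten to a fold over `a`. -/
def pvStepA (st : Int × Int × PySem.Dict Int Int) (v : Int) : Int × Int × PySem.Dict Int Int :=
  let rs := st.1 + (v - 1)
  let cnt := st.2.1 + st.2.2.getD rs 0
  (rs, cnt, st.2.2.insert rs (st.2.2.getD rs 0 + 1))

/-- Number of equal-valued pairs (i < j) in a list. -/
def pvPairs : List Int → Int
  | [] => 0
  | x :: t => (t.count x : Int) + pvPairs t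

/-- The prefix values rs + (x-1), accumulated along the list. -/
def pvPrefVals : Int → List Int → List Int
  | _, [] => []
  | rs, x :: t => (rs + (x - 1)) :: pvPrefVals (rs + (x - 1)) t

lemma pvPairs_append_singleton (l : List Int) (x : Int) :
    pvPairs (l ++ [x]) = pvPairs l + (l.count x : Int) := by
  induction l with
  | nil => simp [pvPairs]
  | cons y t ih =>
      simp only [List.cons_append, pvPairs, ih, List.count_append, List.count_cons,
        List.count_nil, beq_iff_eq]
      by_cases h : x = y
      · subst h; simp; ring
      · have h' : ¬ y = x := fun hh => h hh.symm
        simp [h, h']; ring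

lemma pvPairs_perm {l l' : List Int} (h : l.Perm l') : pvPairs l = pvPairs l' := by
  induction h with
  | nil => rfl
  | cons x hp ih => simp [pvPairs, ih, hp.count_eq]
  | swap x y l =>
      simp only [pvPairs, List.count_cons, beq_iff_eq]
      by_cases h : x = y
      · subst h; ring
      · have h' : ¬ y = x := fun hh => h hh.symm
        simp [h, h']; ring
  | trans _ _ ih1 ih2 => exact ih1.trans ih2

/-- A's loop invariant: the dict is the counter of the prefix values seen so far (L). -/
lemma pvA_inv (rest : List Int) :
    ∀ (L : List Int) (rs cnt : Int) (d : PySem.Dict Int Int),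
      (∀ v, d.getD v 0 = (L.count v : Int)) →
      (rest.foldl pvStepA (rs, cnt, d)).2.1
      = cnt + pvPairs (L ++ pvPrefVals rs rest) - pvPairs L := by
  induction rest with
  | nil => intro L rs cnt d _; simp [pvPrefVals]
  | cons x t ih =>
      intro L rs cnt d hd
      rw [List.foldl_cons,
        show pvStepA (rs, cnt, d) x
          = (rs + (x - 1), cnt + d.getD (rs + (x - 1)) 0,
             d.insert (rs + (x - 1)) (d.getD (rs + (x - 1)) 0 + 1)) from rfl]
      have hd' : ∀ v, (d.insert (rs + (x - 1)) (d.getD (rs + (x - 1)) 0 + 1)).getD v 0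
          = ((L ++ [rs + (x - 1)]).count v : Int) := by
        intro v
        rw [PySem.Dict.getD_insert]
        by_cases h : v = rs + (x - 1)
        · subst h; simp [hd, List.count_append]
        · simp [h, hd, List.count_append,
            show ¬ (rs + (x - 1)) = v from fun hh => h hh.symm]
      rw [ih (L ++ [rs + (x - 1)]) (rs + (x - 1)) (cnt + d.getD (rs + (x - 1)) 0) _ hd',
        hd, pvPairs_append_singleton,
        show L ++ [rs + (x - 1)] ++ pvPrefVals (rs + (x - 1)) t
          = L ++ pvPrefVals rs (x :: t) by simp [pvPrefVals]]
      ring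

/-- B's prefix-building loop produces L ++ pvPrefVals rs rest. -/
lemma pvB_build (rest : List Int) :
    ∀ (L : List Int) (rs : Int),
      (rest.foldl (fun (st : List Int × Int) x =>
        let s := st.2 + (x - 1)
        (st.1 ++ [s], s)) (L, rs)).1 = L ++ pvPrefVals rs rest := by
  induction rest with
  | nil => intro L rs; simp [pvPrefVals]
  | cons x t ih =>
      intro L rs
      simp only [List.foldl_cons, ih, pvPrefVals, List.append_assoc, List.singleton_append]

/-- B's sweep body, named so the head application stays visible for rewriting. -/
def pvStepB (st : Int × Int × Option Int) (x : Int) : Int × Int × Option Int :=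
  let run := if st.2.2 = some x then st.2.1 + 1 else 0
  (st.1 + run, run, some x)

/-- B's sweep invariant over a sorted tail with previous element p and current run r. -/
lemma pvB_scan (l : List Int) :
    ∀ (p r s : Int), (p :: l).Pairwise (· ≤ ·) →
      (l.foldl pvStepB (s, r, some p)).1 = s + pvPairs l + (r + 1) * (l.count p : Int) := by
  induction l with
  | nil => intro p r s _; simp [pvPairs]
  | cons x t ih =>
      intro p r s hsort
      have hpx : p ≤ x := (List.pairwise_cons.mp hsort).1 x (by simp)
      have hxt : (x :: t).Pairwise (· ≤ ·) := (List.pairwise_cons.mp hsort).2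
      rw [List.foldl_cons]
      by_cases h : p = x
      · subst h
        rw [show pvStepB (s, r, some p) p = (s + (r + 1), r + 1, some p) by
            simp [pvStepB],
          ih p (r + 1) (s + (r + 1)) hxt]
        simp only [pvPairs, List.count_cons, beq_self_eq_true]
        push_cast; ring
      · have hcnt : t.count p = 0 := by
          rw [List.count_eq_zero]
          intro hmem
          exact h (le_antisymm hpx ((List.pairwise_cons.mp hxt).1 p hmem))
        rw [show pvStepB (s, r, some p) x = (s + 0, 0, some x) by simp [pvStepB, h],
          ih x 0 (s + 0) hxt]
        simp only [pvPairs, List.count_cons, beq_iff_eq, hcnt,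
          if_neg (show ¬ x = p from fun hh => h hh.symm)]
        push_cast; ring

/-- B's sweep over any sorted list computes the pair count of that list. -/
lemma pvB_sweep (l : List Int) (hsort : l.Pairwise (· ≤ ·)) :
    (l.foldl pvStepB (0, 0, (none : Option Int))).1 = pvPairs l := by
  cases l with
  | nil => simp [pvPairs]
  | cons m t =>
      rw [List.foldl_cons,
        show pvStepB (0, 0, (none : Option Int)) m = ((0 : Int) + 0, 0, some m) by
          simp [pvStepB],
        pvB_scan t m 0 (0 + 0) hsort]
      simp only [pvPairs]
      push_cast; ring

lemma pvInit_counter :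
    ∀ v, (PySem.Dict.ofList [((0 : Int), (1 : Int))]).getD v 0 = (([(0 : Int)].count v : Int)) := by
  intro v
  by_cases h : v = 0
  · subst h; decide
  · rw [show PySem.Dict.ofList [((0 : Int), (1 : Int))]
        = PySem.Dict.empty.insert 0 1 from rfl, PySem.Dict.getD_insert]
    simp [h, show ¬ (0 : Int) = v from fun hh => h hh.symm]

theorem pvCheck_eq (a : List Int) (n : Int) : Check a n = Check_alt a n := by
  have hA : Check a n
      = ((PySem.List.pyRange 0 (PySem.List.len a) 1).foldl
          (fun acc j => pvStepA acc (PySem.List.pyGetD a j 0))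
          (0, 0, PySem.Dict.ofList [(0, 1)])).2.1 := rfl
  have hB : Check_alt a n
      = ((PySem.List.sorted
            (a.foldl (fun (st : List Int × Int) x =>
              let s := st.2 + (x - 1)
              (st.1 ++ [s], s)) (([0] : List Int), 0)).1 (fun v => v) false).foldl
          pvStepB (0, 0, (none : Option Int))).1 := rfl
  have hR := PySem.List.foldl_pyRange_pyGetD a 0 pvStepA
    (((0 : Int), (0 : Int), PySem.Dict.ofList [((0 : Int), (1 : Int))])) (a := 0) le_rfl
  rw [hA, hR]
  simp only [Int.toNat_zero, List.drop_zero]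
  rw [pvA_inv a [0] 0 0 _ pvInit_counter, hB, pvB_build a [0] 0]
  rw [pvB_sweep _ (PySem.List.sorted_pairwise (xs := [0] ++ pvPrefVals 0 a) (key := fun v => v)),
    pvPairs_perm (PySem.List.sorted_perm ([0] ++ pvPrefVals 0 a) (fun v => v) false)]
  simp [pvPairs]

-- ===== VERDICT (by name: the statement is the Claim_ definition above) =====
theorem Check_spec : Claim_equal_Check := by
  intro a n _
  unfold Spec_Check
  exact pvCheck_eq a n
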